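-- pv_equiv track=rewrite | github.com/AymericOwer/p_prec_cmax | Algo/heft.py | compute_ranks
-- ===== SOURCE A (Python) =====
-- def build_successors(precedences):
--     successors = {}
--     for task, preds in precedences.items():
--         for p in preds:
--             if p not in successors:
--                 successors[p] = []
--             successors[p].append(task)
--     return successors
--
-- def compute_ranks(tasks, precedences):
--     successors = build_successors(precedences)
--     ranks = {}
--
--     def dfs(task):
--         # Si le rang est déjà calculé, on le retourne
--         if task in ranks:
--             return ranks[task]
--         succs = successors.get(task, [])
--         # Rank = durée de la tâche + maximum des rangs de ses successeurs
--         rank = tasks[task] + max((dfs(s) for s in succs), default=0)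
--         ranks[task] = rank
--         return rank
--
--     # On calcule le rang de toutes les tâches
--     for task in tasks:
--         dfs(task)
--
--     return ranks
-- ===== SOURCE B (Python) =====
-- def compute_ranks(tasks, precedences):
--     # Iterative DFS with an explicit (node, expanded) stack instead of A's
--     # memoized recursion; same ranks, same insertion (post-)order.
--     successors = {}
--     for task, preds in precedences.items():
--         for p in preds:
--             successors.setdefault(p, []).append(task)
--     ranks = {}
--     for root in tasks:
--         stack = [(root, False)]
--         while stack:
--             node, expanded = stack.pop()
--             if node in ranks:
--                 continue
--             if expanded:
--                 best = 0
--                 first = True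
--                 for s in successors.get(node, []):
--                     r = ranks[s]
--                     if first or r > best:
--                         best = r
--                         first = False
--                 ranks[node] = tasks[node] + best
--             else:
--                 stack.append((node, True))
--                 for s in reversed(successors.get(node, [])):
--                     stack.append((s, False))
--     return ranks
-- ===== Notes on version B (the rewrite author's own statement) =====
-- stated objective: alternative
-- what changed: Replaces A's memoized recursive DFS (nested dfs closure, recursion stack) by an iterative machine driving an explicit (node, expanded) work stack per root, computing each rank with an accumulator loop once all its successors are final; same ranks in the same insertion order.
import Mathlib
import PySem

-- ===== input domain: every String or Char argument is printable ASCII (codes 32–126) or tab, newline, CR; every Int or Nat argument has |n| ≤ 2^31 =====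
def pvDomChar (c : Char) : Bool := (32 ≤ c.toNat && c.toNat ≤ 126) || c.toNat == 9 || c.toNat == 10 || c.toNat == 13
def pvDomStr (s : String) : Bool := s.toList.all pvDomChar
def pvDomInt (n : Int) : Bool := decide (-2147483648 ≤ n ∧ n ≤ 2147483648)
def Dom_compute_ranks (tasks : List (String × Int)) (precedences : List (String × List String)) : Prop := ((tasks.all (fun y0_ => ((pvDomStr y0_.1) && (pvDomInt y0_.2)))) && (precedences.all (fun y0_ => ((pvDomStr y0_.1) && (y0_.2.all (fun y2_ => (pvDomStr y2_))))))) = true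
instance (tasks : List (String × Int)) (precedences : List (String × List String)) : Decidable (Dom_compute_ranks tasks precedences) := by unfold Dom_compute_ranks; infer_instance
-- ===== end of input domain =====

-- ===== PORT A =====
-- A: memoized recursive DFS over the successors graph (fuel = tasks.length + 1 totalizes
-- the recursion; under Pre_ the recursion depth is bounded by the number of tasks, so the
-- fuel is never exhausted).  Return-value equivalence; neither program mutates its arguments.

-- helper build_successors of A
def buildSuccA (precedences : List (String × List String)) : PySem.Dict String (List String) :=
  precedences.foldl (fun succ tp =>
    tp.2.foldl (fun succ p =>
      (if succ.contains p then succ else succ.insert p []).modify p [] (fun l => l ++ [tp.1]))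
      succ) PySem.Dict.empty

mutual
-- the nested 'def dfs(task)': returns (rank, updated memo); none = exception / fuel out
def dfsA (tasks : List (String × Int)) (S : PySem.Dict String (List String)) :
    Nat → String → PySem.Dict String Int → Option (Int × PySem.Dict String Int)
  | 0, _, _ => none
  | f+1, t, ranks =>
    match ranks.get? t with
    | some r => some (r, ranks)                    -- if task in ranks: return ranks[task]
    | none =>
      match (PySem.Dict.mk tasks).get? t with      -- tasks[task] (KeyError → none)
      | none => none
      | some dur =>
        match foldMaxA tasks S f (S.getD t []) none ranks with  -- max((dfs(s) …), default=0)
        | none => none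
        | some (m, ranks1) =>
          let rank := dur + m.getD 0
          some (rank, ranks1.insert t rank)
  termination_by f _ _ => (f, 0, 0)

-- the generator fold inside max(…): running optional max, threading the memo
def foldMaxA (tasks : List (String × Int)) (S : PySem.Dict String (List String)) :
    Nat → List String → Option Int → PySem.Dict String Int →
    Option (Option Int × PySem.Dict String Int)
  | _, [], acc, ranks => some (acc, ranks)
  | f, s :: rest, acc, ranks =>
    match dfsA tasks S f s ranks with
    | none => none
    | some (r, ranks') =>
      foldMaxA tasks S f rest (some (match acc with | none => r | some m => max m r)) ranks'
  termination_by f l _ _ => (f, 1, l.length)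
end

-- 'for task in tasks: dfs(task)'
def loopA (tasks : List (String × Int)) (S : PySem.Dict String (List String)) (fuel : Nat) :
    List String → PySem.Dict String Int → Option (PySem.Dict String Int)
  | [], ranks => some ranks
  | t :: ts, ranks =>
    match dfsA tasks S fuel t ranks with
    | none => none
    | some (_, ranks') => loopA tasks S fuel ts ranks'

def compute_ranks (tasks : List (String × Int)) (precedences : List (String × List String)) :
    List (String × Int) :=
  let S := buildSuccA precedences
  match loopA tasks S (tasks.length + 1) (tasks.map Prod.fst) (PySem.Dict.mk []) with
  | some d => d.items
  | none => []          -- Python raises here; unreachable under Pre_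

-- ===== PORT B =====
-- B: iterative machine over an explicit (node, expanded) stack (fuel totalizes the while
-- loop; generous bound, never exhausted under Pre_).

def buildSuccB (precedences : List (String × List String)) : PySem.Dict String (List String) :=
  precedences.foldl (fun succ tp =>
    tp.2.foldl (fun succ p => succ.insert p (succ.getD p [] ++ [tp.1])) succ) PySem.Dict.empty

-- the 'while stack:' loop; the stack head is the top
def machineB (tasks : List (String × Int)) (S : PySem.Dict String (List String)) :
    Nat → List (String × Bool) → PySem.Dict String Int → Option (PySem.Dict String Int)
  | 0, _, _ => none
  | _+1, [], ranks => some ranks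
  | f+1, (t, exp) :: rest, ranks =>
    if (ranks.get? t).isSome then machineB tasks S f rest ranks            -- continue
    else if exp then
      match (PySem.Dict.mk tasks).get? t with                             -- tasks[node]
      | none => none
      | some dur =>
        -- best/first accumulator loop over the successors ('ranks[s]' is present
        -- whenever this branch is reached inside Pre_; getD is exact there)
        let bf := (S.getD t []).foldl
          (fun (bf : Int × Bool) s =>
            let r := ranks.getD s 0
            if bf.2 || decide (r > bf.1) then (r, false) else bf) (0, true)
        machineB tasks S f rest (ranks.insert t (dur + bf.1))
    else
      machineB tasks S f
        ((S.getD t []).reverse.foldl (fun st s => (s, false) :: st) ((t, true) :: rest)) ranks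

def loopB (tasks : List (String × Int)) (S : PySem.Dict String (List String)) (fuel : Nat) :
    List String → PySem.Dict String Int → Option (PySem.Dict String Int)
  | [], ranks => some ranks
  | t :: ts, ranks =>
    match machineB tasks S fuel [(t, false)] ranks with
    | none => none
    | some ranks' => loopB tasks S fuel ts ranks'

def pvTotalPreds (precedences : List (String × List String)) : Nat :=
  (precedences.map (fun tp => tp.2.length)).sum

def compute_ranks_alt (tasks : List (String × Int)) (precedences : List (String × List String)) :
    List (String × Int) :=
  let S := buildSuccB precedences
  match loopB tasks S ((pvTotalPreds precedences + 2) ^ (tasks.length + 2))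
      (tasks.map Prod.fst) (PySem.Dict.mk []) with
  | some d => d.items
  | none => []

-- ===== PRECONDITION & SPEC =====
-- successors of x read directly off the precedences list (= what build_successors stores at x)
def succOf (precedences : List (String × List String)) (x : String) : List String :=
  precedences.flatMap (fun tp => (tp.2.filter (fun p => p == x)).map (fun _ => tp.1))

-- one peeling round: keep a node while some successor is still unpeeled
def peelStep (precedences : List (String × List String)) (rem : List String) : List String :=
  rem.filter (fun x => (succOf precedences x).any (fun s => rem.contains s))

def peel (precedences : List (String × List String)) : Nat → List String → List String
  | 0, rem => rem
  | n+1, rem => peel precedences n (peelStep precedences rem)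

-- Pre_: exactly the inputs on which Python A returns: both dicts have unique keys (always
-- true of a Python dict), every successor of a task is itself a task (else dfs raises
-- KeyError), and iterated peeling empties the tasks (acyclicity on the visited graph;
-- a cycle makes dfs raise RecursionError).
def Pre_compute_ranks (tasks : List (String × Int)) (precedences : List (String × List String)) : Prop :=
  (tasks.map Prod.fst).Nodup ∧ (precedences.map Prod.fst).Nodup ∧
  (∀ t ∈ tasks.map Prod.fst, ∀ s ∈ succOf precedences t, s ∈ tasks.map Prod.fst) ∧
  peel precedences tasks.length (tasks.map Prod.fst) = []

instance (tasks : List (String × Int)) (precedences : List (String × List String)) :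
    Decidable (Pre_compute_ranks tasks precedences) := by
  unfold Pre_compute_ranks; infer_instance

def pvWitness_compute_ranks : (List (String × Int)) × (List (String × List String)) :=
  ([("a", 2), ("b", 3)], [("a", ["b"])])

def Spec_compute_ranks (tasks : List (String × Int)) (precedences : List (String × List String)) (out : List (String × Int)) : Prop := out = compute_ranks_alt tasks precedences
instance (tasks : List (String × Int)) (precedences : List (String × List String)) (out : List (String × Int)) : Decidable (Spec_compute_ranks tasks precedences out) := by unfold Spec_compute_ranks; infer_instance

-- ===== CLAIM (what is proved, stated in full; the proofs are below) =====
def Claim_equal_compute_ranks : Prop := ∀ (tasks : List (String × Int)) (precedences : List (String × List String)), Dom_compute_ranks tasks precedences → Pre_compute_ranks tasks precedences → Spec_compute_ranks tasks precedences (compute_ranks tasks precedences)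

-- ===== LEMMAS AND PROOFS =====

-- ---- the two builders build the same successor dict, whose entries are succOf ----

lemma pvStepA_eq (d : PySem.Dict String (List String)) (p : String) (f : List String → List String) :
    (if d.contains p then d else d.insert p []).modify p [] f = d.modify p [] f := by
  by_cases h : d.contains p
  · simp [h]
  · simp only [h, Bool.false_eq_true, if_false]
    show (d.insert p []).insert p (f ((d.insert p []).getD p []))
        = d.insert p (f (d.getD p []))
    rw [PySem.Dict.getD_insert_self, PySem.Dict.insert_insert_self]
    rw [PySem.Dict.getD_of_not_contains (d := d) (k := p) (d0 := []) (by simpa using h)]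

lemma pvBuild_eq (precedences : List (String × List String)) :
    buildSuccA precedences = buildSuccB precedences := by
  unfold buildSuccA buildSuccB
  congr 1
  funext succ tp
  congr 1
  funext succ p
  rw [pvStepA_eq]
  rfl

lemma pvBuildB_getD_aux (x : String) :
    ∀ (prec : List (String × List String)) (d : PySem.Dict String (List String)),
    (prec.foldl (fun succ tp =>
        tp.2.foldl (fun succ p => succ.insert p (succ.getD p [] ++ [tp.1])) succ) d).getD x []
      = d.getD x [] ++ succOf prec x := by
  intro prec
  induction prec with
  | nil => intro d; simp [succOf]
  | cons tp rest ih =>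
    intro d
    rw [List.foldl_cons, ih]
    have hmap : tp.2.foldl (fun succ p => succ.insert p (succ.getD p [] ++ [tp.1])) d
        = (tp.2.map (fun p => (p, tp.1))).foldl
            (fun (d : PySem.Dict String (List String)) pr =>
              d.modify pr.1 [] (fun l => l ++ [pr.2])) d := by
      rw [List.foldl_map]; rfl
    rw [hmap, PySem.Dict.getD_foldl_modify_append]
    have hft : ((tp.2.map (fun p => (p, tp.1))).filter (fun pr => pr.1 == x)).map (·.2)
        = (tp.2.filter (fun p => p == x)).map (fun _ => tp.1) := by
      rw [List.filter_map, List.map_map]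
      rfl
    rw [hft]
    simp [succOf]

lemma pvBuild_getD (precedences : List (String × List String)) (x : String) :
    (buildSuccA precedences).getD x [] = succOf precedences x := by
  rw [pvBuild_eq]
  unfold buildSuccB
  rw [pvBuildB_getD_aux]
  simp

lemma pvSuccOf_len_le (precedences : List (String × List String)) (x : String) :
    (succOf precedences x).length ≤ pvTotalPreds precedences := by
  induction precedences with
  | nil => simp [succOf, pvTotalPreds]
  | cons tp rest ih =>
    simp only [succOf, List.flatMap_cons, List.length_append, List.length_map] at ih ⊢
    have h1 : (tp.2.filter (fun p => p == x)).length ≤ tp.2.length :=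
      List.length_filter_le _ _
    simp only [pvTotalPreds, List.map_cons, List.sum_cons] at ih ⊢
    omega

-- ---- peeling facts ----

lemma pvPeelStep_sub (prec : List (String × List String)) (rem : List String) (x : String)
    (h : x ∈ peelStep prec rem) : x ∈ rem :=
  List.mem_of_mem_filter h

lemma pvPeelStep_mono (prec : List (String × List String)) {rem1 rem2 : List String}
    (h : ∀ y ∈ rem1, y ∈ rem2) (x : String) (hx : x ∈ peelStep prec rem1) :
    x ∈ peelStep prec rem2 := by
  simp only [peelStep, List.mem_filter, List.any_eq_true] at hx ⊢
  obtain ⟨hx1, s, hs1, hs2⟩ := hx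
  exact ⟨h x hx1, s, hs1, by
    simp only [List.contains_iff_mem] at hs2 ⊢
    exact h s hs2⟩

lemma pvPeel_mono (prec : List (String × List String)) (n : Nat) :
    ∀ {rem1 rem2 : List String}, (∀ y ∈ rem1, y ∈ rem2) →
    ∀ x ∈ peel prec n rem1, x ∈ peel prec n rem2 := by
  induction n with
  | zero => intro rem1 rem2 h x hx; simpa [peel] using h x (by simpa [peel] using hx)
  | succ n ih =>
    intro rem1 rem2 h x hx
    exact ih (fun y hy => pvPeelStep_mono prec h y hy) x hx

lemma pvPeel_succ_mem (prec : List (String × List String)) (n : Nat) (rem : List String)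
    (x : String) (h : x ∈ peel prec (n+1) rem) : x ∈ peel prec n rem := by
  exact pvPeel_mono prec n (fun y hy => pvPeelStep_sub prec rem y hy) x h

lemma pvPeel_keep (prec : List (String × List String)) :
    ∀ (n : Nat) (rem : List String) (x s : String), x ∈ peel prec n rem →
    s ∈ succOf prec x → s ∈ peel prec n rem → x ∈ peel prec (n+1) rem := by
  intro n
  induction n with
  | zero =>
    intro rem x s hx hs hsrem
    simp only [peel] at hx hsrem ⊢
    simp only [peelStep, List.mem_filter, List.any_eq_true]
    exact ⟨hx, s, hs, by simpa [List.contains_iff_mem] using hsrem⟩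
  | succ n ih =>
    intro rem x s hx hs hsrem
    exact ih (peelStep prec rem) x s hx hs hsrem

-- ---- generic machine / fold facts ----

lemma pvRevPush (l : List String) (init : List (String × Bool)) :
    l.reverse.foldl (fun st s => (s, false) :: st) init
      = l.map (fun s => (s, false)) ++ init := by
  rw [List.foldl_reverse]
  induction l with
  | nil => rfl
  | cons a t ih => simp [List.foldr_cons, ih]

lemma pvMachineB_mono (tasks : List (String × Int)) (S : PySem.Dict String (List String)) :
    ∀ (f f' : Nat) (st : List (String × Bool)) (r d : PySem.Dict String Int), f ≤ f' →
    machineB tasks S f st r = some d → machineB tasks S f' st r = some d := by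
  have step : ∀ (f : Nat) (st : List (String × Bool)) (r d : PySem.Dict String Int),
      machineB tasks S f st r = some d → machineB tasks S (f+1) st r = some d := by
    intro f
    induction f with
    | zero => intro st r d h; simp [machineB] at h
    | succ f ih =>
      intro st r d h
      match st with
      | [] => simpa [machineB] using h
      | (t, exp) :: rest =>
        simp only [machineB] at h ⊢
        by_cases hsome : (r.get? t).isSome
        · simp only [hsome, if_true] at h ⊢
          exact ih _ _ _ h
        · simp only [hsome, Bool.false_eq_true, if_false] at h ⊢
          by_cases hexp : exp = true
          · simp only [hexp, if_true] at h ⊢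
            cases hg : (PySem.Dict.mk tasks).get? t with
            | none => rw [hg] at h; simp at h
            | some dur => rw [hg] at h; exact ih _ _ _ h
          · simp only [hexp] at h ⊢
            exact ih _ _ _ h
  intro f f' st r d hle h
  obtain ⟨k, rfl⟩ := Nat.exists_eq_add_of_le hle
  induction k with
  | zero => exact h
  | succ k ih => exact step (f + k) st r d (ih (by omega))

lemma pvPairMax (l : List String) (g : String → Int) :
    (l.foldl (fun (bf : Int × Bool) s =>
        if bf.2 || decide (g s > bf.1) then (g s, false) else bf) ((0 : Int), true)).1
      = (l.foldl (fun a s =>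
          some (match a with | none => g s | some m => max m (g s))) none).getD 0 := by
  have sub1 : ∀ (l : List String) (b : Int),
      l.foldl (fun (bf : Int × Bool) s =>
          if bf.2 || decide (g s > bf.1) then (g s, false) else bf) (b, false)
        = (l.foldl (fun m s => max m (g s)) b, false) := by
    intro l
    induction l with
    | nil => intro b; rfl
    | cons a t ih =>
      intro b
      by_cases h : g a > b
      · simp only [List.foldl_cons, Bool.false_or, h, decide_true, if_true, ih,
          max_eq_right (le_of_lt h)]
      · simp only [List.foldl_cons, Bool.false_or, h, decide_false, Bool.false_eq_true,
          if_false, ih, max_eq_left (not_lt.mp h)]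
  have sub2 : ∀ (l : List String) (b : Int),
      l.foldl (fun a s =>
          some (match a with | none => g s | some m => max m (g s))) (some b)
        = some (l.foldl (fun m s => max m (g s)) b) := by
    intro l
    induction l with
    | nil => intro b; rfl
    | cons a t ih => intro b; simp only [List.foldl_cons, ih]
  cases l with
  | nil => rfl
  | cons a t =>
    simp only [List.foldl_cons, Bool.true_or, if_true, sub1, sub2, Option.getD_some]

lemma pvTasksGet (tasks : List (String × Int)) (t : String) (h : t ∈ tasks.map Prod.fst) :
    ∃ v, (PySem.Dict.mk tasks).get? t = some v := by
  have h2 := PySem.Dict.get?_eq_none_iff_not_mem_keys (d := PySem.Dict.mk tasks) (k := t)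
  cases hg : (PySem.Dict.mk tasks).get? t with
  | none => exact absurd (by simpa using (h2.mp hg)) (by simpa using h)
  | some v => exact ⟨v, rfl⟩

-- ---- the simulation bundle ----

def pvAOK (tasks : List (String × Int)) (prec : List (String × List String)) (n : Nat)
    (t : String) : Prop :=
  ∀ fa, n ≤ fa → ∀ ranks, ∃ r ranks',
    dfsA tasks (buildSuccA prec) (fa+1) t ranks = some (r, ranks') ∧
    ranks'.get? t = some r ∧
    (∀ x, (ranks.get? x).isSome → ranks'.get? x = ranks.get? x) ∧
    (∀ x, ranks.get? x = none → (ranks'.get? x).isSome →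
        x ∈ tasks.map Prod.fst ∧ x ∉ peel prec n (tasks.map Prod.fst)) ∧
    (∀ rest fb d, machineB tasks (buildSuccA prec) fb rest ranks' = some d →
        machineB tasks (buildSuccA prec) (fb + (pvTotalPreds prec + 2) ^ (n+1))
          ((t, false) :: rest) ranks = some d)

lemma pvAOK_mono (tasks : List (String × Int)) (prec : List (String × List String))
    (n : Nat) (t : String) (h : pvAOK tasks prec n t) : pvAOK tasks prec (n+1) t := by
  intro fa hfa ranks
  obtain ⟨r, ranks', h1, h2, h3, h4, h5⟩ := h fa (by omega) ranks
  refine ⟨r, ranks', h1, h2, h3, ?_, ?_⟩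
  · intro x hx1 hx2
    obtain ⟨hk, hp⟩ := h4 x hx1 hx2
    exact ⟨hk, fun hc => hp (pvPeel_succ_mem prec n _ x hc)⟩
  · intro rest fb d hm
    have := h5 rest fb d hm
    exact pvMachineB_mono tasks _ _ _ _ _ _
      (by
        have : (pvTotalPreds prec + 2) ^ (n+1) ≤ (pvTotalPreds prec + 2) ^ (n+1+1) :=
          Nat.pow_le_pow_right (by omega) (by omega)
        omega) this

lemma pvFold (tasks : List (String × Int)) (prec : List (String × List String)) (n : Nat)
    (IH : ∀ s, s ∈ tasks.map Prod.fst → s ∉ peel prec n (tasks.map Prod.fst) →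
        pvAOK tasks prec n s) :
    ∀ l, (∀ s ∈ l, s ∈ tasks.map Prod.fst ∧ s ∉ peel prec n (tasks.map Prod.fst)) →
    ∀ g, n ≤ g → ∀ acc ranks, ∃ m ranks1,
      foldMaxA tasks (buildSuccA prec) (g+1) l acc ranks = some (m, ranks1) ∧
      m = l.foldl (fun a s =>
          some (match a with | none => ranks1.getD s 0 | some mm => max mm (ranks1.getD s 0))) acc ∧
      (∀ x, (ranks.get? x).isSome → ranks1.get? x = ranks.get? x) ∧
      (∀ x, ranks.get? x = none → (ranks1.get? x).isSome →
          x ∈ tasks.map Prod.fst ∧ x ∉ peel prec n (tasks.map Prod.fst)) ∧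
      (∀ rest fb d, machineB tasks (buildSuccA prec) fb rest ranks1 = some d →
          machineB tasks (buildSuccA prec) (fb + l.length * (pvTotalPreds prec + 2) ^ (n+1))
            (l.map (fun s => (s, false)) ++ rest) ranks = some d) := by
  intro l
  induction l with
  | nil =>
    intro _ g _ acc ranks
    refine ⟨acc, ranks, by rw [foldMaxA], rfl, fun x _ => rfl, ?_, ?_⟩
    · intro x hx1 hx2; rw [hx1] at hx2; simp at hx2
    · intro rest fb d hm; simpa using hm
  | cons s l' ih =>
    intro hl g hg acc ranks
    have hs := hl s (List.mem_cons_self)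
    obtain ⟨r, ranks', ha1, ha2, ha3, ha4, ha5⟩ := IH s hs.1 hs.2 g hg ranks
    obtain ⟨m, ranks1, hf1, hf2, hf3, hf4, hf5⟩ :=
      ih (fun x hx => hl x (List.mem_cons_of_mem _ hx)) g hg
        (some (match acc with | none => r | some mm => max mm r)) ranks'
    have hr1 : ranks1.get? s = some r := by
      rw [hf3 s (by rw [ha2]; rfl)]; exact ha2
    have hrD : ranks1.getD s 0 = r := by
      rw [PySem.Dict.getD_eq_get?_getD, hr1]; rfl
    refine ⟨m, ranks1, ?_, ?_, ?_, ?_, ?_⟩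
    · -- evaluate one step of foldMaxA
      rw [foldMaxA, ha1]
      exact hf1
    · rw [hf2, List.foldl_cons]
      congr 1
      cases acc with
      | none => simp [hrD]
      | some mm => simp [hrD]
    · intro x hx
      have h1 : ranks'.get? x = ranks.get? x := ha3 x hx
      rw [hf3 x (by rw [h1]; exact hx), h1]
    · intro x hx1 hx2
      cases hmid : ranks'.get? x with
      | none => exact hf4 x hmid hx2
      | some v => exact ha4 x hx1 (by rw [hmid]; rfl)
    · intro rest fb d hm
      have step1 := hf5 rest fb d hm
      have step2 := ha5 (l'.map (fun s => (s, false)) ++ rest)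
        (fb + l'.length * (pvTotalPreds prec + 2) ^ (n+1)) d step1
      have harith : fb + (s :: l').length * (pvTotalPreds prec + 2) ^ (n+1)
          = fb + l'.length * (pvTotalPreds prec + 2) ^ (n+1)
            + (pvTotalPreds prec + 2) ^ (n+1) := by
        simp [List.length_cons]; ring
      rw [harith, List.map_cons, List.cons_append]
      exact step2

lemma pvMain (tasks : List (String × Int)) (prec : List (String × List String))
    (Hclosed : ∀ t ∈ tasks.map Prod.fst, ∀ s ∈ succOf prec t, s ∈ tasks.map Prod.fst) :
    ∀ n t, t ∈ tasks.map Prod.fst → t ∉ peel prec n (tasks.map Prod.fst) →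
    pvAOK tasks prec n t := by
  intro n
  induction n with
  | zero =>
    intro t ht hpt
    exact absurd (by simpa [peel] using ht) hpt
  | succ n ihn =>
    intro t ht hpt
    by_cases hcase : t ∈ peel prec n (tasks.map Prod.fst)
    case neg => exact pvAOK_mono tasks prec n t (ihn t ht hcase)
    case pos =>
    have hsucc : ∀ s ∈ succOf prec t, s ∉ peel prec n (tasks.map Prod.fst) := by
      intro s hsmem hsp
      exact hpt (pvPeel_keep prec n _ t s hcase hsmem hsp)
    intro fa hfa ranks
    obtain ⟨g, rfl⟩ : ∃ g, fa = g + 1 := ⟨fa - 1, by omega⟩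
    have hg : n ≤ g := by omega
    have hψ1 : 1 ≤ (pvTotalPreds prec + 2) ^ (n+1+1) := Nat.one_le_pow _ _ (by omega)
    by_cases hmem : (ranks.get? t).isSome
    · -- memoised: dfs returns immediately, the machine skips the frame
      obtain ⟨r, hr⟩ := Option.isSome_iff_exists.mp hmem
      refine ⟨r, ranks, ?_, hr, fun x _ => rfl, ?_, ?_⟩
      · rw [dfsA, hr]
      · intro x hx1 hx2; rw [hx1] at hx2; simp at hx2
      · intro rest fb d hm
        obtain ⟨k, hk⟩ : ∃ k, fb + (pvTotalPreds prec + 2) ^ (n+1+1) = k + 1 :=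
          ⟨fb + (pvTotalPreds prec + 2) ^ (n+1+1) - 1, by omega⟩
        rw [hk, machineB, hr]
        simp only [Option.isSome_some, if_true]
        exact pvMachineB_mono tasks _ fb k rest ranks d (by omega) hm
    · -- expand t
      have hnone : ranks.get? t = none := Option.not_isSome_iff_eq_none.mp hmem
      obtain ⟨dur, hdur⟩ := pvTasksGet tasks t ht
      obtain ⟨m, ranks1, hf1, hf2, hf3, hf4, hf5⟩ :=
        pvFold tasks prec n ihn (succOf prec t)
          (fun s hsmem => ⟨Hclosed t ht s hsmem, hsucc s hsmem⟩) g hg none ranks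
      have ht1 : ranks1.get? t = none := by
        cases hh : ranks1.get? t with
        | none => rfl
        | some v => exact absurd hcase (hf4 t hnone (by rw [hh]; rfl)).2
      refine ⟨dur + m.getD 0, ranks1.insert t (dur + m.getD 0), ?_, ?_, ?_, ?_, ?_⟩
      · rw [dfsA, hnone, hdur, pvBuild_getD, hf1]
      · exact PySem.Dict.get?_insert_self _ _ _
      · intro x hx
        have hxt : x ≠ t := by
          intro he; rw [he, hnone] at hx; simp at hx
        rw [PySem.Dict.get?_insert_of_ne _ _ hxt]
        exact hf3 x hx
      · intro x hx1 hx2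
        by_cases hxt : x = t
        · subst hxt; exact ⟨ht, hpt⟩
        · rw [PySem.Dict.get?_insert_of_ne _ _ hxt] at hx2
          obtain ⟨hk1, hk2⟩ := hf4 x hx1 hx2
          exact ⟨hk1, fun hc => hk2 (pvPeel_succ_mem prec n _ x hc)⟩
      · intro rest fb d hm
        -- the machine pops (t,false), pushes successors and (t,true), processes the
        -- successor frames, then pops (t,true) and inserts the same rank
        have hstep : machineB tasks (buildSuccA prec) (fb+1) ((t, true) :: rest) ranks1
            = some d := by
          rw [machineB, ht1]
          simp only [Option.isSome_none, Bool.false_eq_true, if_false, if_true, hdur]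
          rw [pvBuild_getD]
          have hbf := pvPairMax (succOf prec t) (fun s => ranks1.getD s 0)
          simp only [hbf, ← hf2]
          exact hm
        have hframes := hf5 ((t, true) :: rest) (fb + 1) d hstep
        obtain ⟨k, hk⟩ : ∃ k, fb + (pvTotalPreds prec + 2) ^ (n+1+1) = k + 1 :=
          ⟨fb + (pvTotalPreds prec + 2) ^ (n+1+1) - 1, by omega⟩
        rw [hk, machineB, hnone]
        simp only [Option.isSome_none, Bool.false_eq_true, if_false]
        rw [pvBuild_getD, pvRevPush]
        refine pvMachineB_mono tasks _ _ k _ ranks d ?_ hframes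
        -- fuel accounting: 1 + |succ|·ψ(n) + 1 ≤ ψ(n+1)
        have hlen : (succOf prec t).length ≤ pvTotalPreds prec := pvSuccOf_len_le prec t
        have hψ : 1 ≤ (pvTotalPreds prec + 2) ^ (n+1) := Nat.one_le_pow _ _ (by omega)
        have hpow : (pvTotalPreds prec + 2) ^ (n+1+1)
            = pvTotalPreds prec * (pvTotalPreds prec + 2) ^ (n+1)
              + 2 * (pvTotalPreds prec + 2) ^ (n+1) := by
          rw [pow_succ]; ring
        have hmul : (succOf prec t).length * (pvTotalPreds prec + 2) ^ (n+1)
            ≤ pvTotalPreds prec * (pvTotalPreds prec + 2) ^ (n+1) :=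
          Nat.mul_le_mul_right _ hlen
        omega

lemma pvLoop (tasks : List (String × Int)) (prec : List (String × List String))
    (Hclosed : ∀ t ∈ tasks.map Prod.fst, ∀ s ∈ succOf prec t, s ∈ tasks.map Prod.fst)
    (Hpeel : peel prec tasks.length (tasks.map Prod.fst) = []) :
    ∀ roots, (∀ t ∈ roots, t ∈ tasks.map Prod.fst) → ∀ ranks, ∃ ranksF,
      loopA tasks (buildSuccA prec) (tasks.length + 1) roots ranks = some ranksF ∧
      loopB tasks (buildSuccA prec) ((pvTotalPreds prec + 2) ^ (tasks.length + 2))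
        roots ranks = some ranksF := by
  intro roots
  induction roots with
  | nil => intro _ ranks; exact ⟨ranks, by rw [loopA], by rw [loopB]⟩
  | cons t ts ih =>
    intro hr ranks
    have ht : t ∈ tasks.map Prod.fst := hr t List.mem_cons_self
    have hpt : t ∉ peel prec tasks.length (tasks.map Prod.fst) := by
      rw [Hpeel]; simp
    obtain ⟨r, ranks', h1, _, _, _, h5⟩ :=
      pvMain tasks prec Hclosed tasks.length t ht hpt tasks.length (le_refl _) ranks
    have hmach : machineB tasks (buildSuccA prec)
        (1 + (pvTotalPreds prec + 2) ^ (tasks.length + 1)) [(t, false)] ranks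
        = some ranks' := h5 [] 1 ranks' (by rw [machineB])
    have hmach2 : machineB tasks (buildSuccA prec)
        ((pvTotalPreds prec + 2) ^ (tasks.length + 2)) [(t, false)] ranks = some ranks' := by
      refine pvMachineB_mono tasks _ _ _ _ ranks ranks' ?_ hmach
      have hψ : 1 ≤ (pvTotalPreds prec + 2) ^ (tasks.length + 1) :=
        Nat.one_le_pow _ _ (by omega)
      have hpow : (pvTotalPreds prec + 2) ^ (tasks.length + 2)
          = pvTotalPreds prec * (pvTotalPreds prec + 2) ^ (tasks.length + 1)
            + 2 * (pvTotalPreds prec + 2) ^ (tasks.length + 1) := by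
        rw [pow_succ]; ring
      omega
    obtain ⟨ranksF, hA, hB⟩ := ih (fun x hx => hr x (List.mem_cons_of_mem _ hx)) ranks'
    refine ⟨ranksF, ?_, ?_⟩
    · rw [loopA, h1]; exact hA
    · rw [loopB, hmach2]; exact hB

-- ===== VERDICT (by name: the statement is the Claim_ definition above) =====
theorem compute_ranks_spec : Claim_equal_compute_ranks := by
  intro tasks prec _ hpre
  obtain ⟨_, _, hclosed, hpeel⟩ := hpre
  obtain ⟨ranksF, hA, hB⟩ :=
    pvLoop tasks prec hclosed hpeel (tasks.map Prod.fst) (fun t ht => ht) (PySem.Dict.mk [])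
  unfold Spec_compute_ranks compute_ranks compute_ranks_alt
  rw [← pvBuild_eq]
  simp only [hA, hB]
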